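-- pv_equiv track=rewrite | github.com/uwgraphics/viswordembeddings | app/embedding_sharedmem.py | getListArithmetic
-- ===== SOURCE A (Python) =====
-- def getListArithmetic(inputString, symb = '+'):
--     splitPlus = inputString.split(symb)
--     if (len(splitPlus) == 1) and (not '-' in splitPlus[0]):
--         return [splitPlus[0].strip()]
--     new_list = []
--     for el in splitPlus:
--         el.strip()
--         new_list += getListArithmetic(el, symb = '-')
--         new_list.append(symb)
--     return new_list[:-1]
-- ===== SOURCE B (Python) =====
-- def getListArithmetic(inputString, symb='+'):
--     out = []
--     for part in inputString.split(symb):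
--         if out:
--             out.append(symb)
--         first = True
--         for sub in part.split('-'):
--             if not first:
--                 out.append('-')
--             out.append(sub.strip())
--             first = False
--     return out
-- ===== Notes on version B (the rewrite author's own statement) =====
-- stated objective: simpler
-- what changed: Replaced A's two-level recursion (recursing with symb='-' on each symb-split piece) by a single non-recursive nested loop over inputString.split(symb) and part.split('-') that appends stripped operands and inserts the delimiter tokens between them.
import Mathlib
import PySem

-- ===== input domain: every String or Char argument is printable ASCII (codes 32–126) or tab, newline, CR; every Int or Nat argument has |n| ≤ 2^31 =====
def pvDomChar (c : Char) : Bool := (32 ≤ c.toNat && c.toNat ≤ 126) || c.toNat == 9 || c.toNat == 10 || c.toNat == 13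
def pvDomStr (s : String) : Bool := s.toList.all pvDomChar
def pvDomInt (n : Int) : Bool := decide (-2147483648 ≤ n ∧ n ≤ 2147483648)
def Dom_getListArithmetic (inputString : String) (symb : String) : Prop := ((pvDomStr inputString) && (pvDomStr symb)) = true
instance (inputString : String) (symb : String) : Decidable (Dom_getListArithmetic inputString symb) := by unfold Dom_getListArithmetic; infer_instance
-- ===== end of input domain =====

-- B replaces A's two-level recursion by a single nested loop (split by symb, then by '-',
-- with separator tokens inserted between parts); same return value, objective: simpler.

-- ===== PORT A =====
-- shared helper: s.split(sep); Python raises ValueError for sep = '' (excluded by Pre_),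
-- the getD default there is arbitrary
def pvSplit (s : String) (sep : String) : List String :=
  (PySem.Str.split? s sep).getD [s]

-- termination facts for port A's recursion (cited by decreasing_by): pieces of a
-- '-'-split contain no '-', and a string without '-' splits to itself
lemma pvGo_not_mem (d : Char) : ∀ (fuel : Nat) (l cur : List Char) (acc : List (List Char)),
    l.length < fuel → (∀ p ∈ acc, d ∉ p) → d ∉ cur →
    ∀ p ∈ PySem.Chars.splitOn.go [d] fuel l cur acc, d ∉ p := by
  intro fuel
  induction fuel with
  | zero => intro l cur acc h; omega
  | succ n ih =>
    intro l cur acc hlen hacc hcur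
    cases l with
    | nil =>
      rw [PySem.Chars.splitOn.go]
      · intro p hp
        simp at hp
        rcases hp with h | h
        · exact hacc _ h
        · subst h; simpa using hcur
      · omega
    | cons c rest =>
      rw [PySem.Chars.splitOn.go]
      split
      · rename_i hpre
        have hc : c = d := by
          simp [List.isPrefixOf] at hpre
          tauto
        apply ih
        · simp at hlen ⊢; omega
        · intro p hp
          simp at hp
          rcases hp with h | h
          · subst h; simpa using hcur
          · exact hacc _ h
        · simp
      · rename_i hpre
        have hc : c ≠ d := by
          intro h; subst h
          simp [List.isPrefixOf] at hpre
        apply ih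
        · simp at hlen ⊢; omega
        · exact hacc
        · simp [hcur]
          exact fun h => hc h.symm

lemma pvGo_of_not_mem (d : Char) : ∀ (fuel : Nat) (l cur : List Char) (acc : List (List Char)),
    l.length < fuel → d ∉ l →
    PySem.Chars.splitOn.go [d] fuel l cur acc = ((cur.reverse ++ l) :: acc).reverse := by
  intro fuel
  induction fuel with
  | zero => intro l cur acc h; omega
  | succ n ih =>
    intro l cur acc hlen hl
    cases l with
    | nil =>
      rw [PySem.Chars.splitOn.go]
      · simp
      · omega
    | cons c rest =>
      rw [PySem.Chars.splitOn.go]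
      have hc : c ≠ d := by simp at hl; tauto
      have hpre : ([d].isPrefixOf (c :: rest)) = false := by
        simp [List.isPrefixOf]
        exact fun h => hc h.symm
      rw [hpre]
      simp only [if_neg Bool.false_ne_true]
      rw [ih]
      · simp
      · simp at hlen ⊢; omega
      · simp at hl; tauto

lemma pvSingleton_infix (d : Char) (l : List Char) : [d] <:+: l ↔ d ∈ l := by
  constructor
  · intro h
    obtain ⟨u, v, rfl⟩ := h
    simp
  · intro h
    obtain ⟨s, t, rfl⟩ := List.append_of_mem h
    exact ⟨s, t, by simp⟩

lemma pvSplit_minus_not_mem (s : String) :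
    ∀ p ∈ pvSplit s "-", PySem.Str.isIn "-" p = false := by
  intro p hp
  unfold pvSplit PySem.Str.split? at hp
  simp [PySem.Chars.split?, PySem.Chars.splitOn] at hp
  obtain ⟨q, hq, rfl⟩ := hp
  have hnm : ('-' : Char) ∉ q :=
    pvGo_not_mem '-' (s.length + 1) s.toList [] [] (by simp) (by simp) (by simp) q hq
  rw [PySem.Str.isIn_eq]
  rw [PySem.Chars.isIn_eq_false_iff]
  simpa [pvSingleton_infix] using hnm

lemma pvSplit_of_not_isIn (s : String) (h : PySem.Str.isIn "-" s = false) :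
    pvSplit s "-" = [s] := by
  have hnm : ('-' : Char) ∉ s.toList := by
    rw [PySem.Str.isIn_eq, PySem.Chars.isIn_eq_false_iff] at h
    simpa [pvSingleton_infix] using h
  unfold pvSplit PySem.Str.split?
  simp [PySem.Chars.split?, PySem.Chars.splitOn]
  rw [pvGo_of_not_mem '-' (s.length + 1) s.toList [] [] (by simp) hnm]
  simp

-- port of A: the recursive function, literally; new_list[:-1] is PySem.List.slice … (-1)
-- splitPlus := pvSplit inputString symb (inlined); new_list is the foldl; new_list[:-1] is the slice
def getListArithmetic (inputString : String) (symb : String) : List String :=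
  if h : (pvSplit inputString symb).length = 1 ∧
      PySem.Str.isIn "-" ((pvSplit inputString symb).headD "") = false then
    [PySem.Str.strip ((pvSplit inputString symb).headD "")]
  else
    PySem.List.slice
      ((pvSplit inputString symb).attach.foldl
        (fun acc el => acc ++ getListArithmetic el.1 "-" ++ [symb]) [])
      none (some (-1))
termination_by ((if symb = "-" then 0 else 1 : Nat), inputString.toList.count '-')
decreasing_by
  by_cases hs : symb = "-"
  · subst hs
    apply Prod.Lex.right
    have h0 : el.1.toList.count '-' = 0 := by
      rw [List.count_eq_zero]
      intro hmem
      have := pvSplit_minus_not_mem inputString el.1 el.2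
      rw [PySem.Str.isIn_eq, PySem.Chars.isIn_eq_false_iff] at this
      exact this ((pvSingleton_infix '-' el.1.toList).mpr hmem)
    have h1 : inputString.toList.count '-' ≠ 0 := by
      intro hz
      rw [List.count_eq_zero] at hz
      have hno : PySem.Str.isIn "-" inputString = false := by
        rw [PySem.Str.isIn_eq, PySem.Chars.isIn_eq_false_iff]
        simpa [pvSingleton_infix] using hz
      have hsp := pvSplit_of_not_isIn inputString hno
      apply h
      rw [hsp]
      simpa using hno
    omega
  · exact Prod.Lex.left _ _ (by simp [hs])

-- ===== PORT B =====
-- port of B: one nested loop; outer state = the output list, inner state = (output, first-flag)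
def getListArithmetic_alt (inputString : String) (symb : String) : List String :=
  (pvSplit inputString symb).foldl
    (fun out part =>
      let out1 := if out ≠ [] then out ++ [symb] else out
      ((pvSplit part "-").foldl
        (fun st sub =>
          ((if st.2 then st.1 else st.1 ++ ["-"]) ++ [PySem.Str.strip sub], false))
        (out1, true)).1)
    []

-- ===== PRECONDITION & SPEC =====
-- Pre_ excludes only symb = "": there Python's str.split raises ValueError (in A and in B alike)
def Pre_getListArithmetic (inputString : String) (symb : String) : Prop := symb ≠ ""
instance (inputString : String) (symb : String) : Decidable (Pre_getListArithmetic inputString symb) := by unfold Pre_getListArithmetic; infer_instance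
def pvWitness_getListArithmetic : String × String := ("1 + 2-3", "+")

def Spec_getListArithmetic (inputString : String) (symb : String) (out : List String) : Prop := out = getListArithmetic_alt inputString symb
instance (inputString : String) (symb : String) (out : List String) : Decidable (Spec_getListArithmetic inputString symb out) := by unfold Spec_getListArithmetic; infer_instance

-- ===== CLAIM (what is proved, stated in full; the proofs are below) =====
def Claim_equal_getListArithmetic : Prop := ∀ (inputString : String) (symb : String), Dom_getListArithmetic inputString symb → Pre_getListArithmetic inputString symb → Spec_getListArithmetic inputString symb (getListArithmetic inputString symb)

-- ===== LEMMAS AND PROOFS =====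

lemma pvGo_ne_nil (sep : List Char) : ∀ (fuel : Nat) (l cur : List Char) (acc : List (List Char)),
    PySem.Chars.splitOn.go sep fuel l cur acc ≠ [] := by
  intro fuel
  induction fuel with
  | zero => intro l cur acc; simp [PySem.Chars.splitOn.go]
  | succ n ih =>
    intro l cur acc
    cases l with
    | nil => simp [PySem.Chars.splitOn.go]
    | cons c rest =>
      rw [PySem.Chars.splitOn.go]
      split
      · exact ih _ _ _
      · exact ih _ _ _

lemma pvSplit_ne_nil (s : String) (sep : String) : pvSplit s sep ≠ [] := by
  intro hcontra
  unfold pvSplit PySem.Str.split? at hcontra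
  by_cases he : sep = ""
  · simp [PySem.Chars.split?, he] at hcontra
  · simp [PySem.Chars.split?, PySem.Chars.splitOn, he] at hcontra
    exact pvGo_ne_nil _ _ _ _ _ hcontra

-- the common canonical value both ports compute: operands stripped, delimiters interspersed
def pvInner (el : String) : List String :=
  List.intersperse "-" ((pvSplit el "-").map PySem.Str.strip)

def pvCanon (s : String) (symb : String) : List String :=
  (List.intersperse [symb] ((pvSplit s symb).map pvInner)).flatten

lemma pvInner_ne_nil (el : String) : pvInner el ≠ [] := by
  unfold pvInner
  have := pvSplit_ne_nil el "-"
  cases h : pvSplit el "-" with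
  | nil => exact absurd h this
  | cons a t => cases t <;> simp

lemma pvFlatMap_dropLast {β : Type} (x : β) : ∀ (l : List (List β)), l ≠ [] →
    (l.flatMap (fun a => a ++ [x])).dropLast = (List.intersperse [x] l).flatten := by
  intro l
  induction l with
  | nil => simp
  | cons a t ih =>
    intro _
    cases t with
    | nil => simp
    | cons b t' =>
      have hne : (b :: t').flatMap (fun a => a ++ [x]) ≠ [] := by
        simp
      rw [List.flatMap_cons, List.dropLast_append_of_ne_nil hne]
      rw [ih (by simp)]
      simp [List.intersperse_cons₂]

lemma pvSingle_dropLast {α β : Type} (f : α → β) (x : β) : ∀ (l : List α), l ≠ [] →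
    (l.flatMap (fun a => [f a, x])).dropLast = List.intersperse x (l.map f) := by
  intro l
  induction l with
  | nil => simp
  | cons a t ih =>
    intro _
    cases t with
    | nil => simp
    | cons b t' =>
      have hne : (b :: t').flatMap (fun a => [f a, x]) ≠ [] := by simp
      rw [List.flatMap_cons]
      show ([f a, x] ++ (b :: t').flatMap (fun a => [f a, x])).dropLast = _
      rw [List.dropLast_append_of_ne_nil hne, ih (by simp)]
      simp [List.intersperse_cons₂]

-- A on an operand with no '-' is a single stripped token
lemma pvA_atom (p : String) (h : PySem.Str.isIn "-" p = false) :
    getListArithmetic p "-" = [PySem.Str.strip p] := by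
  rw [getListArithmetic]
  have hs : pvSplit p "-" = [p] := pvSplit_of_not_isIn p h
  have hcond : (pvSplit p "-").length = 1 ∧
      PySem.Str.isIn "-" ((pvSplit p "-").headD "") = false := by
    rw [hs]; simpa using h
  rw [dif_pos hcond, hs]
  simp

-- A called with symb = '-' just splits once and intersperses '-'
lemma pvA_minus (el : String) : getListArithmetic el "-" = pvInner el := by
  rw [getListArithmetic]
  by_cases h : (pvSplit el "-").length = 1 ∧
      PySem.Str.isIn "-" ((pvSplit el "-").headD "") = false
  · rw [dif_pos h]
    obtain ⟨p, hp⟩ := List.length_eq_one_iff.mp h.1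
    unfold pvInner
    rw [hp]
    simp
  · rw [dif_neg h]
    have hfold : (pvSplit el "-").attach.foldl
        (fun acc e => acc ++ getListArithmetic e.1 "-" ++ ["-"]) [] =
        (pvSplit el "-").flatMap (fun p => [PySem.Str.strip p, "-"]) := by
      have h1 : ∀ (e : {x // x ∈ pvSplit el "-"}),
          getListArithmetic e.1 "-" = [PySem.Str.strip e.1] := fun e =>
        pvA_atom e.1 (pvSplit_minus_not_mem el e.1 e.2)
      calc (pvSplit el "-").attach.foldl
            (fun acc e => acc ++ getListArithmetic e.1 "-" ++ ["-"]) []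
          = (pvSplit el "-").attach.foldl
            (fun acc e => acc ++ [PySem.Str.strip e.1, "-"]) [] := by
            apply PySem.List.foldl_congr_mem
            intro acc e _
            rw [h1 e]
            simp
        _ = (pvSplit el "-").attach.flatMap (fun e => [PySem.Str.strip e.1, "-"]) :=
            (List.flatMap_eq_foldl).symm
        _ = _ := by
            rw [← List.attach_map_subtype_val (pvSplit el "-"), List.flatMap_map]
            simp
    rw [hfold, PySem.List.slice_to_neg_one]
    rw [pvSingle_dropLast _ _ _ (pvSplit_ne_nil el "-")]
    rfl

-- A computes the canonical value
lemma pvA_eq (s : String) (symb : String) : getListArithmetic s symb = pvCanon s symb := by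
  rw [getListArithmetic]
  by_cases h : (pvSplit s symb).length = 1 ∧
      PySem.Str.isIn "-" ((pvSplit s symb).headD "") = false
  · rw [dif_pos h]
    obtain ⟨p, hp⟩ := List.length_eq_one_iff.mp h.1
    have hno : PySem.Str.isIn "-" p = false := by
      have := h.2; rw [hp] at this; simpa using this
    unfold pvCanon pvInner
    rw [hp]
    simp [pvSplit_of_not_isIn p hno]
  · rw [dif_neg h]
    have hfold : (pvSplit s symb).attach.foldl
        (fun acc e => acc ++ getListArithmetic e.1 "-" ++ [symb]) [] =
        ((pvSplit s symb).map pvInner).flatMap (fun a => a ++ [symb]) := by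
      calc (pvSplit s symb).attach.foldl
            (fun acc e => acc ++ getListArithmetic e.1 "-" ++ [symb]) []
          = (pvSplit s symb).attach.foldl
            (fun acc e => acc ++ (pvInner e.1 ++ [symb])) [] := by
            apply PySem.List.foldl_congr_mem
            intro acc e _
            rw [pvA_minus e.1]
            simp
        _ = (pvSplit s symb).attach.flatMap (fun e => pvInner e.1 ++ [symb]) :=
            (List.flatMap_eq_foldl).symm
        _ = (pvSplit s symb).flatMap (fun p => pvInner p ++ [symb]) := by
            rw [← List.attach_map_subtype_val (pvSplit s symb), List.flatMap_map]
            simp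
        _ = _ := by rw [List.flatMap_map]
    rw [hfold, PySem.List.slice_to_neg_one]
    rw [pvFlatMap_dropLast _ _ (by simpa using pvSplit_ne_nil s symb)]
    rfl

-- B's inner loop, after the first token (flag = false)
lemma pvB_inner_false : ∀ (subs : List String) (acc : List String),
    (subs.foldl (fun st sub =>
      ((if st.2 then st.1 else st.1 ++ ["-"]) ++ [PySem.Str.strip sub], false))
      (acc, false)).1 =
    acc ++ subs.flatMap (fun sub => ["-", PySem.Str.strip sub]) := by
  intro subs
  induction subs with
  | nil => simp
  | cons x t ih =>
    intro acc
    simp only [List.foldl_cons, List.flatMap_cons]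
    rw [ih]
    simp

lemma pvIntersperse_flatMap {α β : Type} (f : α → β) (x : β) : ∀ (l : List α) (a : β),
    List.intersperse x (a :: l.map f) = a :: l.flatMap (fun s => [x, f s]) := by
  intro l
  induction l with
  | nil => simp
  | cons b t ih =>
    intro a
    rw [List.map_cons, List.intersperse_cons₂, ih (f b)]
    simp

-- B's inner loop from a fresh flag appends the interspersed tokens of one part
lemma pvB_inner (subs : List String) (hne : subs ≠ []) (acc : List String) :
    (subs.foldl (fun st sub =>
      ((if st.2 then st.1 else st.1 ++ ["-"]) ++ [PySem.Str.strip sub], false))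
      (acc, true)).1 =
    acc ++ List.intersperse "-" (subs.map PySem.Str.strip) := by
  cases subs with
  | nil => exact absurd rfl hne
  | cons x t =>
    simp only [List.foldl_cons, if_pos]
    rw [pvB_inner_false t]
    rw [List.map_cons, pvIntersperse_flatMap PySem.Str.strip "-" t (PySem.Str.strip x)]
    simp

lemma pvB_step (out : List String) (symb : String) (part : String) :
    ((pvSplit part "-").foldl (fun st sub =>
      ((if st.2 then st.1 else st.1 ++ ["-"]) ++ [PySem.Str.strip sub], false))
      ((if out ≠ [] then out ++ [symb] else out), true)).1 =
    (if out ≠ [] then out ++ [symb] else out) ++ pvInner part :=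
  pvB_inner (pvSplit part "-") (pvSplit_ne_nil part "-") _

-- B's outer loop from a nonempty accumulator
lemma pvB_outer (symb : String) : ∀ (parts : List String) (out : List String), out ≠ [] →
    parts.foldl (fun out part =>
      let out1 := if out ≠ [] then out ++ [symb] else out
      ((pvSplit part "-").foldl (fun st sub =>
        ((if st.2 then st.1 else st.1 ++ ["-"]) ++ [PySem.Str.strip sub], false))
        (out1, true)).1) out =
    out ++ parts.flatMap (fun p => symb :: pvInner p) := by
  intro parts
  induction parts with
  | nil => simp
  | cons p t ih =>
    intro out hout
    simp only [List.foldl_cons, List.flatMap_cons]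
    rw [pvB_step, if_pos hout]
    rw [ih _ (by simp)]
    simp

lemma pvFlatten_intersperse {β : Type} (x : List β) : ∀ (l : List (List β)) (a : List β),
    (List.intersperse x (a :: l)).flatten = a ++ l.flatMap (fun b => x ++ b) := by
  intro l
  induction l with
  | nil => simp
  | cons b t ih =>
    intro a
    rw [List.intersperse_cons₂, List.flatMap_cons]
    simp only [List.flatten_cons]
    rw [ih b]
    simp

-- B computes the canonical value (for every symb)
lemma pvB_eq (s : String) (symb : String) : getListArithmetic_alt s symb = pvCanon s symb := by
  unfold getListArithmetic_alt pvCanon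
  obtain ⟨p, t, hpt⟩ : ∃ p t, pvSplit s symb = p :: t := by
    cases h : pvSplit s symb with
    | nil => exact absurd h (pvSplit_ne_nil s symb)
    | cons a t => exact ⟨a, t, rfl⟩
  rw [hpt]
  simp only [List.foldl_cons]
  rw [pvB_step, if_neg (by simp)]
  simp only [List.nil_append]
  rw [pvB_outer symb t (pvInner p) (pvInner_ne_nil p)]
  rw [List.map_cons, pvFlatten_intersperse]
  rw [List.flatMap_map]
  rfl

-- ===== VERDICT (by name: the statement is the Claim_ definition above) =====
theorem getListArithmetic_spec : Claim_equal_getListArithmetic := by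
  intro inputString symb _ _
  unfold Spec_getListArithmetic
  rw [pvA_eq, pvB_eq]
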